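-- pv_equiv track=rewrite | github.com/tom-brash/advent-of-code | 2020/day24/24-2.py | parse_instruction
-- ===== SOURCE A (Python) =====
-- def parse_instruction(instruction):
--     directions = []
--     while instruction != '':
--         if instruction[0] == 'n' or instruction[0] == 's':
--             directions.append(instruction[:2])
--             instruction = instruction[2:]
--         else:
--             directions.append(instruction[0])
--             instruction = instruction[1:]
--     return directions
-- ===== SOURCE B (Python) =====
-- def parse_instruction(instruction):
--     tokens = []
--     pending = None
--     for ch in instruction:
--         if pending is not None:
--             tokens.append(pending + ch)
--             pending = None
--         elif ch in ('n', 's'):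
--             pending = ch
--         else:
--             tokens.append(ch)
--     if pending is not None:
--         tokens.append(pending)
--     return tokens
-- ===== Notes on version B (the rewrite author's own statement) =====
-- stated objective: faster
-- what changed: Replaces the while-loop that repeatedly slices and reassigns the string with a single for-loop state machine over the characters that holds a pending north/south prefix character and merges it with the next character.
import Mathlib
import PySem

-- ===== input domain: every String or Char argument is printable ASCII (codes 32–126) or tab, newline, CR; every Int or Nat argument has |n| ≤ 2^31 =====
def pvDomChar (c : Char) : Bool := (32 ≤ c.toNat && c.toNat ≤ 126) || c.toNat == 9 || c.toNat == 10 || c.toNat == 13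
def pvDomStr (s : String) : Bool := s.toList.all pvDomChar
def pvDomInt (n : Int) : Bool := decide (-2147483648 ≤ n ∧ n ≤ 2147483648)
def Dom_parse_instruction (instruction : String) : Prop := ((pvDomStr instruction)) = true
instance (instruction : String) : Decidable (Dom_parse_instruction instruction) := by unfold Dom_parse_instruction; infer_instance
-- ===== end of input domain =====

-- B replaces A's slicing while-loop by a one-pass state machine with a pending north/south prefix character: asymptotically faster (no repeated slicing), same values.

-- ===== PORT A =====
-- the while loop: chars is the remaining instruction, directions the accumulator
def pvA_loop (chars : List Char) (directions : List String) : List String :=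
  match chars with
  | [] => directions
  | c :: rest =>
    if c = 'n' ∨ c = 's' then
      pvA_loop ((c :: rest).drop 2) (directions ++ [String.ofList ((c :: rest).take 2)])
    else
      pvA_loop rest (directions ++ [String.ofList [c]])
  termination_by chars.length
  decreasing_by all_goals simp

def parse_instruction (instruction : String) : List String :=
  pvA_loop instruction.toList []

-- ===== PORT B =====
-- one step of the for-loop: state = (tokens, pending)
def pvB_step (st : List String × Option Char) (ch : Char) : List String × Option Char :=
  match st with
  | (tokens, some p) => (tokens ++ [String.ofList [p, ch]], none)
  | (tokens, none) =>
    if ch = 'n' ∨ ch = 's' then (tokens, some ch) else (tokens ++ [String.ofList [ch]], none)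

-- after the loop: flush a leftover pending character
def pvB_finish (st : List String × Option Char) : List String :=
  match st with
  | (tokens, some p) => tokens ++ [String.ofList [p]]
  | (tokens, none) => tokens

def parse_instruction_alt (instruction : String) : List String :=
  pvB_finish (instruction.toList.foldl pvB_step ([], none))

-- ===== PRECONDITION & SPEC =====
def Spec_parse_instruction (instruction : String) (out : List String) : Prop := out = parse_instruction_alt instruction
instance (instruction : String) (out : List String) : Decidable (Spec_parse_instruction instruction out) := by unfold Spec_parse_instruction; infer_instance

-- ===== CLAIM (what is proved, stated in full; the proofs are below) =====
def Claim_equal_parse_instruction : Prop := ∀ (instruction : String), Dom_parse_instruction instruction → Spec_parse_instruction instruction (parse_instruction instruction)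

-- ===== LEMMAS AND PROOFS =====
lemma pvAB_key : ∀ (n : ℕ) (chars : List Char) (tokens : List String), chars.length ≤ n →
    pvA_loop chars tokens = pvB_finish (chars.foldl pvB_step (tokens, none)) := by
  intro n
  induction n with
  | zero =>
    intro chars tokens h
    have : chars = [] := List.eq_nil_of_length_eq_zero (Nat.le_zero.mp h)
    subst this
    simp [pvA_loop, pvB_finish]
  | succ m ih =>
    intro chars tokens h
    match chars with
    | [] => simp [pvA_loop, pvB_finish]
    | c :: rest =>
      by_cases hc : c = 'n' ∨ c = 's'
      · match rest with
        | [] =>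
          simp [pvA_loop, hc, pvB_step, pvB_finish]
        | d :: rest' =>
          rw [pvA_loop]
          simp only [hc, if_true, List.drop, List.take]
          rw [ih rest' _ (by simp at h ⊢; omega)]
          simp [pvB_step, hc]
      · rw [pvA_loop]
        simp only [hc, if_false]
        rw [ih rest _ (by simp at h; omega)]
        simp [pvB_step, hc]

-- ===== VERDICT (by name: the statement is the Claim_ definition above) =====
theorem parse_instruction_spec : Claim_equal_parse_instruction := by
  intro instruction _
  unfold Spec_parse_instruction parse_instruction parse_instruction_alt
  exact pvAB_key instruction.toList.length instruction.toList [] le_rfl
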